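-- pv_equiv track=rewrite | github.com/geektutor/Leaderboard | python/day 29.py | keys_pressed
-- ===== SOURCE A (Python) =====
-- def keys_pressed(word):
--     '''
--     This function takes in word, a string containing text
--     and returns a string containing the keys that should be pressed
--     to print out the word...
--     '''
--     assert type(word)==str,'Invalid input...'
--     mapper = {
--         1:list('.,?!:'),
--         2: list('ABC'),
--         3: list('DEF'),
--         4: list('GHI'),
--         5: list('JKL'),
--         6: list('MNO'),
--         7: list('PQRS'),
--         8: list('TUV'),
--         9: list('WXYZ'),
--         0:[' ']
--     }
--     pressed = ''
--     for i in word: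
--         no = 0
--         key=''
--         for k,v in mapper.items():
--             if i.upper() in v:
--                 key=k
--                 no = v.index(i.upper()) +1
--         press = str(key)*no
--         pressed+=press
--     return pressed
-- ===== SOURCE B (Python) =====
-- def keys_pressed(word):
--     assert type(word) == str, 'Invalid input...'
--     out = []
--     for ch in word:
--         c = ch.upper()
--         if c == ' ':
--             out.append('0')
--         elif 'A' <= c <= 'Z':
--             o = ord(c) - 65
--             if o < 15:
--                 key, pos = 2 + o // 3, o % 3 + 1
--             elif o < 19:
--                 key, pos = 7, o - 14
--             elif o < 22:
--                 key, pos = 8, o - 18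
--             else:
--                 key, pos = 9, o - 21
--             out.append(str(key) * pos)
--         else:
--             p = '.,?!:'.find(c)
--             if p >= 0:
--                 out.append('1' * (p + 1))
--     return ''.join(out)
-- ===== Notes on version B (the rewrite author's own statement) =====
-- stated objective: faster
-- what changed: B drops the keypad table entirely: each character's key digit and press count are computed in closed form by arithmetic on its character code (2+o//3 and o%3+1 with adjustments for the 4-letter keys 7 and 9), with only a 5-char find for the key-1 punctuation, instead of A's per-character scan of the whole 10-key table with membership test and list.index.
import Mathlib
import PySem

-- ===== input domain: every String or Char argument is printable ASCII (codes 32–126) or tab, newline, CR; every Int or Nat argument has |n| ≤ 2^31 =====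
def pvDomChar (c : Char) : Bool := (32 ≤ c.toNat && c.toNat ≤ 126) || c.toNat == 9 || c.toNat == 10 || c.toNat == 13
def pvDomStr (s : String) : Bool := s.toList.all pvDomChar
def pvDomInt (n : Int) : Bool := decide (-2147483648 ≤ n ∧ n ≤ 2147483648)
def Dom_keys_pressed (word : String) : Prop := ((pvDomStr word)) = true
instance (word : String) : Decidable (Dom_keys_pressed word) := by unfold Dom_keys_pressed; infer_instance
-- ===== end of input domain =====

-- B replaces A's per-character scan of the keypad table by closed-form arithmetic on the
-- character code (no table at all for letters/space); objective: alternative.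

-- ===== PORT A =====
-- the mapper dict of A, as its items list (Int key, list of chars)
def kpMapper : List (Int × List Char) :=
  [(1, ['.', ',', '?', '!', ':']), (2, ['A', 'B', 'C']), (3, ['D', 'E', 'F']),
   (4, ['G', 'H', 'I']), (5, ['J', 'K', 'L']), (6, ['M', 'N', 'O']),
   (7, ['P', 'Q', 'R', 'S']), (8, ['T', 'U', 'V']), (9, ['W', 'X', 'Y', 'Z']),
   (0, [' '])]

-- A: for each char, scan all mapper items keeping the last hit (key as str, index+1), then append str(key)*no
def keys_pressed (word : String) : String :=
  String.mk <| word.toList.foldl (fun pressed i =>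
    let st : List Char × Int := kpMapper.foldl (fun st kv =>
      if PySem.Chars.upperChar i ∈ kv.2 then
        ((PySem.Int.toStr kv.1).toList,
         ((PySem.List.index? kv.2 (PySem.Chars.upperChar i)).getD 0 : Int) + 1)
      else st) ([], 0)
    pressed ++ PySem.List.pyRepeat st.1 st.2) []

-- ===== PORT B =====
-- B's per-character closed form: space → '0'; letters ('A' ≤ c ≤ 'Z', i.e. 65 ≤ code ≤ 90)
-- get key/position by arithmetic on ord(c)-65; punctuation via '.,?!:'.find; else nothing.
def kpPiece (ch : Char) : List Char :=
  let c := PySem.Chars.upperChar ch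
  if c = ' ' then ['0']
  else if 65 ≤ c.toNat ∧ c.toNat ≤ 90 then
    let o : Nat := c.toNat - 65
    let kp : Int × Nat :=
      if o < 15 then (2 + (o : Int) / 3, o % 3 + 1)
      else if o < 19 then (7, o - 14)
      else if o < 22 then (8, o - 18)
      else (9, o - 21)
    PySem.List.pyRepeat (PySem.Int.toStr kp.1).toList (kp.2 : Int)
  else
    match PySem.List.index? ['.', ',', '?', '!', ':'] c with
    | some p => PySem.List.pyRepeat ['1'] ((p : Int) + 1)
    | none => []

-- B: one pass over the word, joining the per-character pieces
def keys_pressed_alt (word : String) : String :=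
  String.mk (word.toList.map kpPiece).flatten

-- ===== PRECONDITION & SPEC =====
def Spec_keys_pressed (word : String) (out : String) : Prop := out = keys_pressed_alt word
instance (word : String) (out : String) : Decidable (Spec_keys_pressed word out) := by unfold Spec_keys_pressed; infer_instance

-- ===== CLAIM =====
def Claim_equal_keys_pressed : Prop := ∀ (word : String), Dom_keys_pressed word → Spec_keys_pressed word (keys_pressed word)

-- ===== LEMMAS AND PROOFS =====

-- A's per-character piece
def pieceA (i : Char) : List Char :=
  let st : List Char × Int := kpMapper.foldl (fun st kv =>
    if PySem.Chars.upperChar i ∈ kv.2 then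
      ((PySem.Int.toStr kv.1).toList,
       ((PySem.List.index? kv.2 (PySem.Chars.upperChar i)).getD 0 : Int) + 1)
    else st) ([], 0)
  PySem.List.pyRepeat st.1 st.2

set_option maxRecDepth 8192 in
lemma piece_eq_small : ∀ n : Nat, n < 128 → pieceA (Char.ofNat n) = kpPiece (Char.ofNat n) := by
  decide

lemma piece_eq (c : Char) (h : pvDomChar c = true) : pieceA c = kpPiece c := by
  have hlt : c.toNat < 128 := by
    simp [pvDomChar] at h
    omega
  have := piece_eq_small c.toNat hlt
  rwa [Char.ofNat_toNat] at this

lemma foldl_pieceA (l : List Char) (acc : List Char) (h : ∀ c ∈ l, pvDomChar c = true) :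
    l.foldl (fun pressed i => pressed ++ pieceA i) acc = acc ++ (l.map kpPiece).flatten := by
  induction l generalizing acc with
  | nil => simp
  | cons x xs ih =>
    simp only [List.foldl_cons, List.map_cons, List.flatten_cons]
    rw [ih _ (fun c hc => h c (List.mem_cons_of_mem _ hc)),
        piece_eq x (h x (List.mem_cons_self)), List.append_assoc]

-- ===== VERDICT =====
theorem keys_pressed_spec : Claim_equal_keys_pressed := by
  intro word hdom
  unfold Spec_keys_pressed keys_pressed keys_pressed_alt
  have h : ∀ c ∈ word.toList, pvDomChar c = true := by
    simpa [Dom_keys_pressed, pvDomStr, List.all_eq_true] using hdom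
  rw [show (fun pressed i => pressed ++
        (let st : List Char × Int := kpMapper.foldl (fun st kv =>
          if PySem.Chars.upperChar i ∈ kv.2 then
            ((PySem.Int.toStr kv.1).toList,
             ((PySem.List.index? kv.2 (PySem.Chars.upperChar i)).getD 0 : Int) + 1)
          else st) ([], 0)
        PySem.List.pyRepeat st.1 st.2)) = (fun pressed i => pressed ++ pieceA i) from rfl]
  rw [foldl_pieceA _ _ h]
  rfl
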